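-- pv_equiv track=rewrite | github.com/Victorb11-hub/product-intelligence-agents | agents/base_platform_agent.py | _check_proximity
-- ===== SOURCE A (Python) =====
-- def _check_proximity(words: list, w1: str, w2: str, max_distance: int) -> bool:
--     """Check if w1 appears within max_distance words of w2."""
--     positions_w1 = [i for i, w in enumerate(words) if w1 in w]
--     positions_w2 = [i for i, w in enumerate(words) if w2 in w]
--     for p1 in positions_w1:
--         for p2 in positions_w2:
--             if abs(p1 - p2) <= max_distance:
--                 return True
--     return False
-- ===== SOURCE B (Python) =====
-- def _check_proximity(words: list, w1: str, w2: str, max_distance: int) -> bool: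
--     """Single pass: keep the last position matching each pattern; a qualifying
--     pair exists iff some match is within max_distance of the *latest* earlier
--     match of the other pattern."""
--     last1 = None
--     last2 = None
--     for i, w in enumerate(words):
--         m1 = w1 in w
--         m2 = w2 in w
--         if m1:
--             last1 = i
--         if m2:
--             last2 = i
--         if m1 and last2 is not None and i - last2 <= max_distance:
--             return True
--         if m2 and last1 is not None and i - last1 <= max_distance:
--             return True
--     return False
-- ===== Notes on version B (the rewrite author's own statement) =====
-- stated objective: faster
-- what changed: Replaced the two precomputed position lists and the nested all-pairs scan by a single pass over words that tracks only the last position matching each pattern and compares each new match against the latest earlier match of the other pattern.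
import Mathlib
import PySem

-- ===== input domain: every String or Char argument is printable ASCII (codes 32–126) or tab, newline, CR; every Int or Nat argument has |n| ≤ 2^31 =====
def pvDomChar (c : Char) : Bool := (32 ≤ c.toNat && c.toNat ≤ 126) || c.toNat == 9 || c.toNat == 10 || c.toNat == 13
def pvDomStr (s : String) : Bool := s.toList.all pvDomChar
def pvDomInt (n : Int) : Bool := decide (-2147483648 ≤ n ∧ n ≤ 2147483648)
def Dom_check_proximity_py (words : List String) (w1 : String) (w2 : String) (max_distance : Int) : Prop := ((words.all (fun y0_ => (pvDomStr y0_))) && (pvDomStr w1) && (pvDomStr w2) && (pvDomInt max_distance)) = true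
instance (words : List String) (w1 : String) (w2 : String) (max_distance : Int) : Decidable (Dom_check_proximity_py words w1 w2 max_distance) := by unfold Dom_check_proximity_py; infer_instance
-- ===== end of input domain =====

-- B replaces A's precomputed position lists + nested all-pairs scan by one pass
-- keeping only the last position matching each pattern (objective: faster).

-- ===== PORT A =====
def check_proximity_py (words : List String) (w1 : String) (w2 : String) (max_distance : Int) : Bool :=
  let positions_w1 := ((PySem.List.enumerate words 0).filter (fun p => PySem.Str.isIn w1 p.2)).map (·.1)
  let positions_w2 := ((PySem.List.enumerate words 0).filter (fun p => PySem.Str.isIn w2 p.2)).map (·.1)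
  positions_w1.any (fun p1 => positions_w2.any (fun p2 => decide (|p1 - p2| ≤ max_distance)))

-- ===== PORT B =====
-- single pass with the current index and the last matching position of each pattern
-- chk i d l  ports "l is not None and i - l <= d"
def chk (i d : Int) : Option Int → Bool
  | some p => decide (i - p ≤ d)
  | none => false

def altLoop (w1 w2 : String) (d : Int) : List String → Int → Option Int → Option Int → Bool
  | [], _, _, _ => false
  | w :: ws, i, l1, l2 =>
    let m1 := PySem.Str.isIn w1 w
    let m2 := PySem.Str.isIn w2 w
    let l1' := if m1 then some i else l1
    let l2' := if m2 then some i else l2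
    if m1 && chk i d l2' then true
    else if m2 && chk i d l1' then true
    else altLoop w1 w2 d ws (i + 1) l1' l2'

def check_proximity_py_alt (words : List String) (w1 : String) (w2 : String) (max_distance : Int) : Bool :=
  altLoop w1 w2 max_distance words 0 none none

-- ===== PRECONDITION & SPEC =====
def Spec_check_proximity_py (words : List String) (w1 : String) (w2 : String) (max_distance : Int) (out : Bool) : Prop := out = check_proximity_py_alt words w1 w2 max_distance
instance (words : List String) (w1 : String) (w2 : String) (max_distance : Int) (out : Bool) : Decidable (Spec_check_proximity_py words w1 w2 max_distance out) := by unfold Spec_check_proximity_py; infer_instance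

-- ===== CLAIM (what is proved, stated in full; the proofs are below) =====
def Claim_equal_check_proximity_py : Prop := ∀ (words : List String) (w1 : String) (w2 : String) (max_distance : Int), Dom_check_proximity_py words w1 w2 max_distance → Spec_check_proximity_py words w1 w2 max_distance (check_proximity_py words w1 w2 max_distance)

-- ===== LEMMAS AND PROOFS =====

-- positions of words (starting at index i) whose word contains pat
def posList (pat : String) (ws : List String) (i : Int) : List Int :=
  ((PySem.List.enumerate ws i).filter (fun p => PySem.Str.isIn pat p.2)).map (·.1)

def pairEx (d : Int) (P1 P2 : List Int) : Bool :=
  P1.any (fun a => P2.any (fun b => decide (|a - b| ≤ d)))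

lemma posList_nil (pat : String) (i : Int) : posList pat [] i = [] := rfl

lemma posList_cons (pat : String) (w : String) (ws : List String) (i : Int) :
    posList pat (w :: ws) i =
      (if PySem.Str.isIn pat w then [i] else []) ++ posList pat ws (i + 1) := by
  unfold posList
  rw [PySem.List.enumerate_cons]
  by_cases h : PySem.Chars.isIn pat.toList w.toList = true <;> simp [PySem.Str.isIn, h]

lemma pairEx_iff (d : Int) (P1 P2 : List Int) :
    pairEx d P1 P2 = true ↔ ∃ a ∈ P1, ∃ b ∈ P2, |a - b| ≤ d := by
  simp [pairEx]

-- invariant: l is the maximum of pre (none iff pre is empty), all of pre below i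
def goodState (l : Option Int) (pre : List Int) (i : Int) : Prop :=
  (∀ q ∈ pre, q < i) ∧
  (match l with
   | none => pre = []
   | some m => m ∈ pre ∧ ∀ q ∈ pre, q ≤ m)

lemma goodState_step_hit (l : Option Int) (pre : List Int) (i : Int)
    (h : goodState l pre i) : goodState (some i) (pre ++ [i]) (i + 1) := by
  obtain ⟨hlt, _⟩ := h
  refine ⟨?_, ?_, ?_⟩
  · intro q hq; rcases List.mem_append.1 hq with h | h
    · exact lt_trans (hlt q h) (by omega)
    · simp at h; omega
  · simp
  · intro q hq; rcases List.mem_append.1 hq with h | h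
    · exact le_of_lt (hlt q h)
    · simp at h; omega

lemma goodState_step_miss (l : Option Int) (pre : List Int) (i : Int)
    (h : goodState l pre i) : goodState l pre (i + 1) := by
  obtain ⟨hlt, hm⟩ := h
  exact ⟨fun q hq => lt_trans (hlt q hq) (by omega), hm⟩

-- main loop invariant: the one-pass loop decides exactly the pair-existence of A,
-- given that no qualifying pair lies entirely in the already-consumed prefixes.
lemma altLoop_eq (w1 w2 : String) (d : Int) (ws : List String) :
    ∀ (i : Int) (l1 l2 : Option Int) (pre1 pre2 : List Int),
      goodState l1 pre1 i → goodState l2 pre2 i →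
      pairEx d pre1 pre2 = false →
      altLoop w1 w2 d ws i l1 l2 =
        pairEx d (pre1 ++ posList w1 ws i) (pre2 ++ posList w2 ws i) := by
  induction ws with
  | nil =>
    intro i l1 l2 pre1 pre2 _ _ hno
    simp [altLoop, posList_nil, hno]
  | cons w ws ih =>
    intro i l1 l2 pre1 pre2 hg1 hg2 hno
    rw [posList_cons, posList_cons]
    generalize hm1 : PySem.Str.isIn w1 w = m1
    generalize hm2 : PySem.Str.isIn w2 w = m2
    obtain ⟨l1', hl1'⟩ : ∃ x, x = if m1 then some i else l1 := ⟨_, rfl⟩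
    obtain ⟨l2', hl2'⟩ : ∃ x, x = if m2 then some i else l2 := ⟨_, rfl⟩
    obtain ⟨pre1', hp1'⟩ : ∃ x, x = pre1 ++ (if m1 then [i] else []) := ⟨_, rfl⟩
    obtain ⟨pre2', hp2'⟩ : ∃ x, x = pre2 ++ (if m2 then [i] else []) := ⟨_, rfl⟩
    have hre1 : pre1 ++ ((if m1 then [i] else []) ++ posList w1 ws (i + 1))
        = pre1' ++ posList w1 ws (i + 1) := by rw [hp1', List.append_assoc]
    have hre2 : pre2 ++ ((if m2 then [i] else []) ++ posList w2 ws (i + 1))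
        = pre2' ++ posList w2 ws (i + 1) := by rw [hp2', List.append_assoc]
    rw [hre1, hre2]
    have hunf : altLoop w1 w2 d (w :: ws) i l1 l2 =
        (if m1 && chk i d l2' then true
         else if m2 && chk i d l1' then true
         else altLoop w1 w2 d ws (i + 1) l1' l2') := by
      rw [hl1', hl2', ← hm1, ← hm2]; rfl
    -- new states are good
    have hg1' : goodState l1' pre1' (i + 1) := by
      cases m1 with
      | true => rw [hl1', hp1']; simpa using goodState_step_hit l1 pre1 i hg1
      | false => rw [hl1', hp1']; simpa using goodState_step_miss l1 pre1 i hg1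
    have hg2' : goodState l2' pre2' (i + 1) := by
      cases m2 with
      | true => rw [hl2', hp2']; simpa using goodState_step_hit l2 pre2 i hg2
      | false => rw [hl2', hp2']; simpa using goodState_step_miss l2 pre2 i hg2
    have hmem1' : ∀ q ∈ pre1', q ≤ i := fun q hq => by
      have := hg1'.1 q hq; omega
    have hmem2' : ∀ q ∈ pre2', q ≤ i := fun q hq => by
      have := hg2'.1 q hq; omega
    by_cases hC : (m1 && chk i d l2') = true ∨ (m2 && chk i d l1') = true
    · -- the loop returns true; exhibit a qualifying pair on the RHS
      have hL : altLoop w1 w2 d (w :: ws) i l1 l2 = true := by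
        rw [hunf]
        rcases hC with h | h <;> rw [h] <;> simp
      rw [hL]; symm; rw [pairEx_iff]
      rcases hC with h | h
      · obtain ⟨hm1t, hrest⟩ := Bool.and_eq_true_iff.1 h
        cases hl2eq : l2' with
        | none => rw [hl2eq] at hrest; simp [chk] at hrest
        | some p =>
          rw [hl2eq] at hrest
          have hpd : i - p ≤ d := by simpa [chk] using hrest
          have hpi : p ∈ pre2' := by
            cases m2 with
            | true =>
              rw [if_pos rfl] at hl2'
              rw [hl2eq] at hl2'; injection hl2' with h'; subst h'
              rw [hp2']; simp
            | false =>
              rw [if_neg (by simp)] at hl2'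
              obtain ⟨_, hmax⟩ := hg2
              rw [hl2eq] at hl2'
              rw [← hl2'] at hmax
              rw [hp2']; simp; exact hmax.1
          refine ⟨i, ?_, p, List.mem_append_left _ hpi, ?_⟩
          · exact List.mem_append_left _ (by rw [hp1']; simp [hm1t])
          · have hle := hmem2' p hpi
            rw [abs_sub_le_iff]; omega
      · obtain ⟨hm2t, hrest⟩ := Bool.and_eq_true_iff.1 h
        cases hl1eq : l1' with
        | none => rw [hl1eq] at hrest; simp [chk] at hrest
        | some p =>
          rw [hl1eq] at hrest
          have hpd : i - p ≤ d := by simpa [chk] using hrest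
          have hpi : p ∈ pre1' := by
            cases m1 with
            | true =>
              rw [if_pos rfl] at hl1'
              rw [hl1eq] at hl1'; injection hl1' with h'; subst h'
              rw [hp1']; simp
            | false =>
              rw [if_neg (by simp)] at hl1'
              obtain ⟨_, hmax⟩ := hg1
              rw [hl1eq] at hl1'
              rw [← hl1'] at hmax
              rw [hp1']; simp; exact hmax.1
          refine ⟨p, List.mem_append_left _ hpi, i, ?_, ?_⟩
          · exact List.mem_append_left _ (by rw [hp2']; simp [hm2t])
          · have hle := hmem1' p hpi
            rw [abs_sub_le_iff]; omega
    · -- neither check fires: recurse; no qualifying pair in the new prefixes either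
      push_neg at hC
      obtain ⟨hc1f, hc2f⟩ := hC
      have hc1f : (m1 && chk i d l2') = false := by
        revert hc1f; cases (m1 && chk i d l2') <;> simp
      have hc2f : (m2 && chk i d l1') = false := by
        revert hc2f; cases (m2 && chk i d l1') <;> simp
      have hstep : altLoop w1 w2 d (w :: ws) i l1 l2 = altLoop w1 w2 d ws (i + 1) l1' l2' := by
        rw [hunf, hc1f, hc2f]; simp
      rw [hstep]
      have hno' : pairEx d pre1' pre2' = false := by
        by_contra h
        have h' : pairEx d pre1' pre2' = true := by
          revert h; cases pairEx d pre1' pre2' <;> simp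
        obtain ⟨a, ha, b, hb, hab⟩ := (pairEx_iff d pre1' pre2').1 h'
        rw [hp1'] at ha; rw [hp2'] at hb
        rcases List.mem_append.1 ha with ha' | hai
        · rcases List.mem_append.1 hb with hb' | hbi
          · have : pairEx d pre1 pre2 = true := (pairEx_iff d pre1 pre2).2 ⟨a, ha', b, hb', hab⟩
            rw [hno] at this; exact Bool.false_ne_true this
          · -- b = i (so m2 holds); the c2 check would have fired via the max of pre1'
            have hm2t : m2 = true := by
              cases m2 with
              | true => rfl
              | false => simp at hbi
            have hbi' : b = i := by rw [hm2t] at hbi; simpa using hbi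
            have hamem : a ∈ pre1' := by rw [hp1']; exact List.mem_append_left _ ha'
            cases hl1eq : l1' with
            | none =>
              have hinv := hg1'.2; rw [hl1eq] at hinv; simp at hinv
              rw [hinv] at hamem; simp at hamem
            | some m =>
              have hinv := hg1'.2; rw [hl1eq] at hinv
              have ham : a ≤ m := hinv.2 a hamem
              have hmi : m ≤ i := hmem1' m hinv.1
              have habs : i - a ≤ d := by rw [abs_sub_le_iff] at hab; omega
              have : (m2 && chk i d l1') = true := by
                rw [hl1eq, hm2t]; simp [chk]; omega
              rw [hc2f] at this; exact Bool.false_ne_true this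
        · -- a = i (so m1 holds); the c1 check would have fired via the max of pre2'
          have hm1t : m1 = true := by
            cases m1 with
            | true => rfl
            | false => simp at hai
          have hai' : a = i := by rw [hm1t] at hai; simpa using hai
          have hbmem : b ∈ pre2' := by rw [hp2']; exact hb
          cases hl2eq : l2' with
          | none =>
            have hinv := hg2'.2; rw [hl2eq] at hinv; simp at hinv
            rw [hinv] at hbmem; simp at hbmem
          | some m =>
            have hinv := hg2'.2; rw [hl2eq] at hinv
            have hbm : b ≤ m := hinv.2 b hbmem
            have hmi : m ≤ i := hmem2' m hinv.1
            have habs : i - b ≤ d := by rw [abs_sub_le_iff] at hab; omega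
            have : (m1 && chk i d l2') = true := by
              rw [hl2eq, hm1t]; simp [chk]; omega
            rw [hc1f] at this; exact Bool.false_ne_true this
      exact ih (i + 1) l1' l2' pre1' pre2' hg1' hg2' hno'

-- ===== VERDICT (by name: the statement is the Claim_ definition above) =====
theorem check_proximity_py_spec : Claim_equal_check_proximity_py := by
  intro words w1 w2 d _
  unfold Spec_check_proximity_py check_proximity_py check_proximity_py_alt
  have h := altLoop_eq w1 w2 d words 0 none none [] []
    ⟨by simp, by simp [goodState]⟩ ⟨by simp, by simp [goodState]⟩ rfl
  simp only [List.nil_append] at h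
  rw [h]
  rfl
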